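-- pv_equiv track=rewrite | github.com/SudhanshuDhanik/MY-CODING | PYTHON/college/QuestionBank/unit3/Q36.py | find_repeated_elements
-- ===== SOURCE A (Python) =====
-- def find_repeated_elements(list1, list2):
--     # Concatenate the two lists
--     combined_list = list1 + list2
--
--     # Create a dictionary to count the occurrences of each element
--     element_count = {}
--     for element in combined_list:
--         if element in element_count:
--             element_count[element] += 1
--         else:
--             element_count[element] = 1
--
--     # Create a list of elements that appear more than once
--     repeated_elements = [element for element, count in element_count.items() if count > 1]
--
--     # Sort the list in ascending order
--     repeated_elements.sort()
--
--     return repeated_elements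
-- ===== SOURCE B (Python) =====
-- def find_repeated_elements(list1, list2):
--     seen = set()
--     repeated = set()
--     for element in list1 + list2:
--         if element in seen:
--             repeated.add(element)
--         else:
--             seen.add(element)
--     return sorted(repeated)
-- ===== Notes on version B (the rewrite author's own statement) =====
-- stated objective: simpler
-- what changed: One pass with two sets (seen/repeated) that flags an element on its second occurrence, replacing the count dictionary, the post-loop filter comprehension and the in-place sort of a list.
import Mathlib
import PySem

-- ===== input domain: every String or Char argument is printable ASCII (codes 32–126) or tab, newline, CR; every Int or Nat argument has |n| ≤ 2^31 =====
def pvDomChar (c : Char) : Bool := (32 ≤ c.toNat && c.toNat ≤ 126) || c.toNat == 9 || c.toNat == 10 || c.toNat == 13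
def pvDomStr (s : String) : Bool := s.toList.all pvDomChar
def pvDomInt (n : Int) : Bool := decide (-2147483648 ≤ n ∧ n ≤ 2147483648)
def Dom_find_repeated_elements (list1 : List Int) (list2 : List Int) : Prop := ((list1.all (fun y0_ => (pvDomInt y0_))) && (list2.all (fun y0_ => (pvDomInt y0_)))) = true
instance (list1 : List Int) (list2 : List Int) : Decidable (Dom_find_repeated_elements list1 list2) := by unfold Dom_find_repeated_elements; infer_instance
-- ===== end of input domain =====

-- B replaces the count dictionary + post-loop filter with one pass over two sets
-- (seen/repeated), flagging an element on its second occurrence; objective: simpler.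
-- ===== PORT A =====
def find_repeated_elements (list1 : List Int) (list2 : List Int) : List Int :=
  let combined_list := list1 ++ list2
  let element_count : PySem.Dict Int Int :=
    combined_list.foldl
      (fun d element =>
        if d.contains element then d.modify element 0 (· + 1)
        else d.insert element 1)
      PySem.Dict.empty
  let repeated_elements :=
    (element_count.items.filter (fun p => decide (1 < p.2))).map (·.1)
  PySem.List.sorted repeated_elements (fun x => x) false


-- ===== PORT B =====
def find_repeated_elements_alt (list1 : List Int) (list2 : List Int) : List Int :=
  let st :=
    (list1 ++ list2).foldl
      (fun (p : PySem.Set Int × PySem.Set Int) element =>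
        if PySem.Set.contains p.1 element then (p.1, PySem.Set.add p.2 element)
        else (PySem.Set.add p.1 element, p.2))
      (PySem.Set.empty, PySem.Set.empty)
  PySem.List.sorted st.2 (fun x => x) false


-- ===== PRECONDITION & SPEC =====
def Spec_find_repeated_elements (list1 : List Int) (list2 : List Int) (out : List Int) : Prop := out = find_repeated_elements_alt list1 list2
instance (list1 : List Int) (list2 : List Int) (out : List Int) : Decidable (Spec_find_repeated_elements list1 list2 out) := by unfold Spec_find_repeated_elements; infer_instance

-- ===== CLAIM (what is proved, stated in full; the proofs are below) =====
def Claim_equal_find_repeated_elements : Prop := ∀ (list1 : List Int) (list2 : List Int), Dom_find_repeated_elements list1 list2 → Spec_find_repeated_elements list1 list2 (find_repeated_elements list1 list2)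

-- ===== LEMMAS AND PROOFS =====

-- A's counting loop body is exactly Counter's step: the not-yet-present branch
-- inserts 1, which is what modify with default 0 does.
theorem stepA_eq_counter_step (d : PySem.Dict Int Int) (x : Int) :
    (if d.contains x then d.modify x 0 (· + 1) else d.insert x 1) = d.modify x 0 (· + 1) := by
  by_cases h : d.contains x = true
  · simp [h]
  · have hf : d.contains x = false := by simpa using h
    have h2 : d.get? x = none := by
      rw [PySem.Dict.get?_eq_none_iff_contains]; simp [hf]
    simp [hf, PySem.Dict.modify, PySem.Dict.getD, h2]

theorem countA_eq_counter (l : List Int) :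
    l.foldl (fun d element => if d.contains element then d.modify element 0 (· + 1)
                              else d.insert element 1) PySem.Dict.empty
      = PySem.Dict.counter l := by
  rw [PySem.Dict.counter_eq_foldl]
  congr 1
  funext d x
  exact stepA_eq_counter_step d x

-- Invariant of B's one-pass loop: seen is set(prefix) and repeated holds, without
-- duplicates, exactly the elements occurring at least twice in the prefix.
theorem B_loop_invariant (l : List Int) :
    (l.foldl (fun (p : PySem.Set Int × PySem.Set Int) element =>
        if PySem.Set.contains p.1 element then (p.1, PySem.Set.add p.2 element)
        else (PySem.Set.add p.1 element, p.2)) (PySem.Set.empty, PySem.Set.empty)).1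
      = PySem.Set.ofList l
    ∧ (l.foldl (fun (p : PySem.Set Int × PySem.Set Int) element =>
        if PySem.Set.contains p.1 element then (p.1, PySem.Set.add p.2 element)
        else (PySem.Set.add p.1 element, p.2)) (PySem.Set.empty, PySem.Set.empty)).2.Nodup
    ∧ ∀ x : Int, x ∈ (l.foldl (fun (p : PySem.Set Int × PySem.Set Int) element =>
        if PySem.Set.contains p.1 element then (p.1, PySem.Set.add p.2 element)
        else (PySem.Set.add p.1 element, p.2)) (PySem.Set.empty, PySem.Set.empty)).2
        ↔ 2 ≤ l.count x := by
  induction l using List.reverseRecOn with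
  | nil => simp [PySem.Set.empty, PySem.Set.ofList]
  | append_singleton l a ih =>
    obtain ⟨hs, hnd, hmem⟩ := ih
    rw [List.foldl_append]
    simp only [List.foldl_cons, List.foldl_nil]
    by_cases hc : PySem.Set.contains
        ((l.foldl (fun (p : PySem.Set Int × PySem.Set Int) element =>
          if PySem.Set.contains p.1 element then (p.1, PySem.Set.add p.2 element)
          else (PySem.Set.add p.1 element, p.2)) (PySem.Set.empty, PySem.Set.empty)).1) a = true
    · have hal : a ∈ l := by
        have := (PySem.Set.contains_iff _ _).mp hc
        rwa [hs, PySem.Set.mem_ofList] at this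
      rw [if_pos hc]
      refine ⟨by rw [hs, PySem.Set.ofList_append_singleton, PySem.Set.add_of_mem
          (by rw [PySem.Set.mem_ofList]; exact hal)], PySem.Set.nodup_add _ _ hnd, ?_⟩
      intro x
      rw [PySem.Set.mem_add, hmem x, List.count_append]
      by_cases hxa : x = a
      · subst hxa
        have h1 : 1 ≤ l.count x := List.one_le_count_iff.mpr hal
        simp; omega
      · have h0 : List.count x [a] = 0 := by simp [Ne.symm hxa]
        rw [h0]; simp [hxa]
    · have hcf : PySem.Set.contains
          ((l.foldl (fun (p : PySem.Set Int × PySem.Set Int) element =>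
            if PySem.Set.contains p.1 element then (p.1, PySem.Set.add p.2 element)
            else (PySem.Set.add p.1 element, p.2)) (PySem.Set.empty, PySem.Set.empty)).1) a = false := by
        simpa using hc
      have hal : a ∉ l := by
        intro h
        apply hc
        rw [PySem.Set.contains_iff, hs, PySem.Set.mem_ofList]; exact h
      rw [if_neg hc]
      refine ⟨by rw [hs, PySem.Set.ofList_append_singleton], hnd, ?_⟩
      intro x
      rw [hmem x, List.count_append]
      by_cases hxa : x = a
      · subst hxa
        have h0 : l.count x = 0 := List.count_eq_zero.mpr hal
        simp [h0]
      · have h0 : List.count x [a] = 0 := by simp [Ne.symm hxa]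
        rw [h0]; simp

theorem repA_characterisation (l : List Int) :
    ((PySem.Dict.counter l).items.filter (fun p => decide (1 < p.2))).map (·.1)
      = (PySem.Set.ofList l).filter (fun k => decide ((1 : Int) < (l.count k : Int))) := by
  rw [PySem.Dict.items_counter, List.filter_map, List.map_map]
  simp [Function.comp_def]

theorem find_repeated_elements_spec : Claim_equal_find_repeated_elements := by
  intro list1 list2 _
  unfold Spec_find_repeated_elements find_repeated_elements find_repeated_elements_alt
  simp only
  obtain ⟨hs, hnd, hmem⟩ := B_loop_invariant (list1 ++ list2)
  rw [countA_eq_counter, repA_characterisation]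
  rw [PySem.List.sorted_id_eq_sorted_id_iff_perm]
  apply (List.perm_ext_iff_of_nodup (List.Nodup.filter _ (PySem.Set.nodup_ofList _)) hnd).mpr
  intro x
  rw [List.mem_filter, PySem.Set.mem_ofList, hmem x]
  constructor
  · rintro ⟨-, h⟩
    have := of_decide_eq_true h
    exact_mod_cast this
  · intro h
    have h1 : 1 ≤ (list1 ++ list2).count x := by omega
    refine ⟨List.one_le_count_iff.mp h1, decide_eq_true ?_⟩
    exact_mod_cast h
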